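-- pv_equiv track=rewrite | github.com/ZouWang-spider/Cluster-ASTE | Cluster_ASTE/BaseModel/Boundary_aware.py | Extract_phrases_from_indices
-- ===== SOURCE A (Python) =====
-- def Extract_phrases_from_indices(sentence, aspect_indices, opinion_indices):
--
--     words = sentence.split()
--
--     # Function to extract phrases based on indices
--     def get_phrases(indices):
--         phrases = []
--         current_phrase = []
--
--         # Iterate over the given index
--         for i, idx in enumerate(indices):
--             # 如果当前索引是最后一个元素或与下一个元素不连续，则结束当前短语
--             if i == len(indices) - 1 or indices[i] + 1 != indices[i + 1]:
--                 current_phrase.append(words[idx])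
--                 phrases.append(" ".join(current_phrase))  # 将短语作为一个整体加入
--                 current_phrase = []  # 清空短语，开始下一个短语
--             else:
--                 # 如果当前词与下一个词连续，继续将其合并
--                 current_phrase.append(words[idx])
--
--         return phrases
--
--     # 获取方面词和观点词的短语
--     aspect_phrases = get_phrases(aspect_indices)
--     opinion_phrases = get_phrases(opinion_indices)
--
--     return aspect_phrases, opinion_phrases
-- ===== SOURCE B (Python) =====
-- def Extract_phrases_from_indices(sentence, aspect_indices, opinion_indices):
--     words = sentence.split()
--
--     # Two-phase: first find where each maximal consecutive run starts (a backward
--     # difference), then build each phrase from the slice between adjacent starts.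
--     def get_phrases(indices):
--         n = len(indices)
--         starts = [p for p in range(n) if p == 0 or indices[p - 1] + 1 != indices[p]]
--         bounds = starts + [n]
--         return [" ".join(words[i] for i in indices[a:b])
--                 for a, b in zip(bounds, bounds[1:])]
--
--     return get_phrases(aspect_indices), get_phrases(opinion_indices)
-- ===== Notes on version B (the rewrite author's own statement) =====
-- stated objective: alternative
-- what changed: Replaces A's single accumulate-and-lookahead loop (a growing current_phrase buffer flushed when the next index is not consecutive) with a two-phase decomposition: a comprehension computes the run-start positions via a backward difference, then each phrase is built by slicing the indices between adjacent boundaries and joining the looked-up words.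
import Mathlib
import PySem

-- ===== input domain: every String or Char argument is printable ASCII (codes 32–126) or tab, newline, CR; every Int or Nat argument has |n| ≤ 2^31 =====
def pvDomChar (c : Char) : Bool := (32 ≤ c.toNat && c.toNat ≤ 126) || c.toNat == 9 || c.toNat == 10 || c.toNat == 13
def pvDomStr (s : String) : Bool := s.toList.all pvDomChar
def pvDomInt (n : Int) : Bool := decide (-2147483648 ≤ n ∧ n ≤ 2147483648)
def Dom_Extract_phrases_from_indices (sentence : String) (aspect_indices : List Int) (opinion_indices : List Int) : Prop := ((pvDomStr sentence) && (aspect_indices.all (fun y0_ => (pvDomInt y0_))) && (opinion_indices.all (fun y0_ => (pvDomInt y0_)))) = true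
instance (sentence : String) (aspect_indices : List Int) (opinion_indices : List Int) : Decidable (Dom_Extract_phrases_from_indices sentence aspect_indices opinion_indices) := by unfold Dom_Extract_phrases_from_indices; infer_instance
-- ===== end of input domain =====

-- B re-groups the indices by precomputing the run-start positions (a backward
-- difference) and slicing between adjacent boundaries, instead of A's single
-- accumulate-and-lookahead loop; objective: alternative decomposition, same cost.

-- ===== PORT A =====
-- the loop of A's get_phrases: state (phrases, current_phrase); the lookahead
-- 'i == len(indices)-1 or indices[i]+1 != indices[i+1]' becomes a match on the tail
def pvGoA (words : List String) : List String → List String → List Int → List String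
  | phrases, _, [] => phrases
  | phrases, cur, idx :: rest =>
    match rest with
    | [] => phrases ++ [PySem.Str.join " " (cur ++ [PySem.List.pyGetD words idx ""])]
    | next :: _ =>
      if idx + 1 ≠ next then
        pvGoA words (phrases ++ [PySem.Str.join " " (cur ++ [PySem.List.pyGetD words idx ""])]) [] rest
      else
        pvGoA words phrases (cur ++ [PySem.List.pyGetD words idx ""]) rest

def Extract_phrases_from_indices (sentence : String) (aspect_indices : List Int) (opinion_indices : List Int) : List String × List String :=
  let words := PySem.Str.split₀ sentence
  (pvGoA words [] [] aspect_indices, pvGoA words [] [] opinion_indices)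

-- ===== PORT B =====
-- Source B's get_phrases: run-start positions, boundary list, then slice-and-join
def pvGetPhrasesB (words : List String) (indices : List Int) : List String :=
  let n : Int := indices.length
  let starts := (PySem.List.pyRange 0 n).filter (fun p =>
      p == 0 || PySem.List.pyGetD indices (p - 1) 0 + 1 != PySem.List.pyGetD indices p 0)
  let bounds := starts ++ [n]
  (bounds.zip (PySem.List.slice bounds (some 1) none)).map (fun ab =>
      PySem.Str.join " " ((PySem.List.slice indices (some ab.1) (some ab.2)).map
        (fun i => PySem.List.pyGetD words i "")))

def Extract_phrases_from_indices_alt (sentence : String) (aspect_indices : List Int) (opinion_indices : List Int) : List String × List String :=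
  let words := PySem.Str.split₀ sentence
  (pvGetPhrasesB words aspect_indices, pvGetPhrasesB words opinion_indices)

-- ===== PRECONDITION & SPEC =====
-- Pre_ excludes exactly the inputs where Python A raises IndexError: some index
-- out of range for the word list words = sentence.split().
def Pre_Extract_phrases_from_indices (sentence : String) (aspect_indices : List Int) (opinion_indices : List Int) : Prop :=
  (∀ i ∈ aspect_indices, PySem.Raise.InRange (PySem.Str.split₀ sentence).length i) ∧
  (∀ i ∈ opinion_indices, PySem.Raise.InRange (PySem.Str.split₀ sentence).length i)
instance (sentence : String) (aspect_indices : List Int) (opinion_indices : List Int) : Decidable (Pre_Extract_phrases_from_indices sentence aspect_indices opinion_indices) := by unfold Pre_Extract_phrases_from_indices; infer_instance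

def pvWitness_Extract_phrases_from_indices : String × List Int × List Int := ("the food was great", [1], [3, 2])

def Spec_Extract_phrases_from_indices (sentence : String) (aspect_indices : List Int) (opinion_indices : List Int) (out : List String × List String) : Prop := out = Extract_phrases_from_indices_alt sentence aspect_indices opinion_indices
instance (sentence : String) (aspect_indices : List Int) (opinion_indices : List Int) (out : List String × List String) : Decidable (Spec_Extract_phrases_from_indices sentence aspect_indices opinion_indices out) := by unfold Spec_Extract_phrases_from_indices; infer_instance

-- ===== CLAIM (what is proved, stated in full; the proofs are below) =====
def Claim_equal_Extract_phrases_from_indices : Prop := ∀ (sentence : String) (aspect_indices : List Int) (opinion_indices : List Int), Dom_Extract_phrases_from_indices sentence aspect_indices opinion_indices → Pre_Extract_phrases_from_indices sentence aspect_indices opinion_indices → Spec_Extract_phrases_from_indices sentence aspect_indices opinion_indices (Extract_phrases_from_indices sentence aspect_indices opinion_indices)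

-- ===== LEMMAS AND PROOFS =====

-- canonical decomposition of an index list into its maximal consecutive runs
def pvConsHead (x : Int) : List (List Int) → List (List Int)
  | [] => [[x]]
  | r :: rs => (x :: r) :: rs

def pvRuns : List Int → List (List Int)
  | [] => []
  | [x] => [[x]]
  | x :: y :: rest => if x + 1 = y then pvConsHead x (pvRuns (y :: rest)) else [x] :: pvRuns (y :: rest)

def pvJoinW (words : List String) (r : List Int) : String :=
  PySem.Str.join " " (r.map (fun i => PySem.List.pyGetD words i ""))

lemma pvRuns_cons_ne_nil (y : Int) (rest : List Int) : pvRuns (y :: rest) ≠ [] := by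
  cases rest with
  | nil => simp [pvRuns]
  | cons z t =>
    simp only [pvRuns]
    split_ifs with h
    · cases hz : pvRuns (z :: t) with
      | nil => simp [pvConsHead]
      | cons r rs => simp [pvConsHead]
    · simp

-- ===== A side: the loop emits exactly one joined phrase per maximal run =====
def pvEmitA (words : List String) (cur : List String) : List (List Int) → List String
  | [] => []
  | r :: rs => PySem.Str.join " " (cur ++ r.map (fun i => PySem.List.pyGetD words i "")) :: rs.map (pvJoinW words)

lemma pvGoA_single (words phrases cur : List String) (idx : Int) :
    pvGoA words phrases cur [idx] = phrases ++ [PySem.Str.join " " (cur ++ [PySem.List.pyGetD words idx ""])] := rfl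

lemma pvGoA_cons (words phrases cur : List String) (idx next : Int) (tail : List Int) :
    pvGoA words phrases cur (idx :: next :: tail) =
      if idx + 1 ≠ next then
        pvGoA words (phrases ++ [PySem.Str.join " " (cur ++ [PySem.List.pyGetD words idx ""])]) [] (next :: tail)
      else
        pvGoA words phrases (cur ++ [PySem.List.pyGetD words idx ""]) (next :: tail) := rfl

lemma pvGoA_eq (words : List String) (l : List Int) :
    ∀ (phrases cur : List String),
      pvGoA words phrases cur l = phrases ++ pvEmitA words cur (pvRuns l) := by
  induction l using pvRuns.induct with
  | case1 => intro phrases cur; simp [pvGoA, pvRuns, pvEmitA]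
  | case2 x => intro phrases cur; simp [pvGoA_single, pvRuns, pvEmitA]
  | case3 x rest ih =>
    intro phrases cur
    obtain ⟨r, rs, hr⟩ : ∃ r rs, pvRuns ((x + 1) :: rest) = r :: rs := by
      cases h : pvRuns ((x + 1) :: rest) with
      | nil => exact absurd h (pvRuns_cons_ne_nil (x + 1) rest)
      | cons r rs => exact ⟨r, rs, rfl⟩
    rw [pvGoA_cons, if_neg (by simp), ih]
    simp only [pvRuns, hr, pvConsHead]
    simp [pvEmitA]
  | case4 x y rest h ih =>
    intro phrases cur
    obtain ⟨r, rs, hr⟩ : ∃ r rs, pvRuns (y :: rest) = r :: rs := by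
      cases hh : pvRuns (y :: rest) with
      | nil => exact absurd hh (pvRuns_cons_ne_nil y rest)
      | cons r rs => exact ⟨r, rs, rfl⟩
    rw [pvGoA_cons, if_pos h, ih]
    simp only [pvRuns, if_neg h]
    simp [hr, pvEmitA, pvJoinW]

lemma pvA_eq_runs (words : List String) (l : List Int) :
    pvGoA words [] [] l = (pvRuns l).map (pvJoinW words) := by
  rw [pvGoA_eq]
  cases h : pvRuns l with
  | nil => simp [pvEmitA]
  | cons r rs => simp [pvEmitA, pvJoinW]

-- ===== B side: Nat-level restatement of the boundary computation =====
def pvCond (l : List Int) (p : Nat) : Bool := p == 0 || (l.getD (p - 1) 0 + 1 != l.getD p 0)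
def pvStartsN (l : List Int) : List Nat := (List.range l.length).filter (pvCond l)
def pvBoundsN (l : List Int) : List Nat := pvStartsN l ++ [l.length]
def pvRunsBN (l : List Int) : List (List Int) :=
  ((pvBoundsN l).zip (pvBoundsN l).tail).map (fun ab => (l.drop ab.1).take (ab.2 - ab.1))

lemma pvB_eq_runsBN (words : List String) (l : List Int) :
    pvGetPhrasesB words l = (pvRunsBN l).map (pvJoinW words) := by
  have hcond : ((fun p => p == 0 || PySem.List.pyGetD l (p - 1) 0 + 1 != PySem.List.pyGetD l p 0) ∘ (Nat.cast : Nat → Int)) = pvCond l := by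
    funext p
    cases p with
    | zero => simp [pvCond]
    | succ q =>
      simp only [Function.comp, pvCond]
      have h1 : ((q + 1 : Nat) : Int) - 1 = ((q : Nat) : Int) := by push_cast; ring
      rw [h1, PySem.List.pyGetD_natCast, PySem.List.pyGetD_natCast]
      simp
      exact fun h => absurd h (by omega)
  simp only [pvGetPhrasesB, pvRunsBN, pvBoundsN]
  have hstarts : (PySem.List.pyRange 0 (l.length : Int)).filter (fun p =>
      p == 0 || PySem.List.pyGetD l (p - 1) 0 + 1 != PySem.List.pyGetD l p 0)
      = (pvStartsN l).map (Nat.cast : Nat → Int) := by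
    rw [PySem.List.pyRange_zero_nat, List.filter_map, hcond]
    rfl
  rw [hstarts]
  have hb : (pvStartsN l).map (Nat.cast : Nat → Int) ++ [(l.length : Int)]
      = (pvStartsN l ++ [l.length]).map (Nat.cast : Nat → Int) := by simp
  rw [hb, PySem.List.slice_from_one]
  generalize pvStartsN l ++ [l.length] = B
  rw [← List.map_tail, List.zip_map, List.map_map, List.map_map]
  apply List.map_congr_left
  intro ab _
  obtain ⟨a, b⟩ := ab
  simp only [Function.comp, Prod.map, PySem.List.slice_natCast, pvJoinW]

lemma pvCond_succ_succ (x : Int) (l : List Int) (q : Nat) :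
    pvCond (x :: l) (q + 2) = pvCond l (q + 1) := by
  simp [pvCond]

lemma pvStartsN_cons (z : Int) (m : List Int) :
    pvStartsN (z :: m) =
      0 :: (((List.range m.length).filter (fun q => pvCond (z :: m) (q + 1))).map Nat.succ) := by
  unfold pvStartsN
  rw [show (z :: m).length = m.length + 1 from rfl, List.range_succ_eq_map,
      List.filter_cons_of_pos (by simp [pvCond]), List.filter_map]
  rfl

lemma pvStartsN_cons_cons (x y : Int) (rest : List Int) :
    pvStartsN (x :: y :: rest) =
      if x + 1 = y then 0 :: ((pvStartsN (y :: rest)).tail).map Nat.succ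
      else 0 :: (pvStartsN (y :: rest)).map Nat.succ := by
  rw [pvStartsN_cons, pvStartsN_cons]
  have hlen : (y :: rest).length = rest.length + 1 := rfl
  have hcongr : ((fun q => pvCond (x :: y :: rest) (q + 1)) ∘ Nat.succ)
      = (fun q => pvCond (y :: rest) (q + 1)) := by
    funext q
    exact pvCond_succ_succ x (y :: rest) q
  rw [hlen, List.range_succ_eq_map]
  by_cases h : x + 1 = y
  · rw [if_pos h, List.filter_cons_of_neg (by simp [pvCond, h]), List.filter_map, hcongr,
        List.tail_cons]
  · rw [if_neg h, List.filter_cons_of_pos (by simp [pvCond, h]), List.filter_map, hcongr,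
        List.map_cons, List.map_map]

lemma pvShift_eq (x : Int) (l : List Int) :
    ((fun ab : Nat × Nat => ((x :: l).drop ab.1).take (ab.2 - ab.1)) ∘ Prod.map Nat.succ Nat.succ)
      = (fun ab : Nat × Nat => (l.drop ab.1).take (ab.2 - ab.1)) := by
  funext ab
  obtain ⟨a, b⟩ := ab
  simp [Nat.succ_sub_succ]

lemma pvRunsBN_cons_cons (x y : Int) (rest : List Int) :
    pvRunsBN (x :: y :: rest) =
      if x + 1 = y then pvConsHead x (pvRunsBN (y :: rest)) else [x] :: pvRunsBN (y :: rest) := by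
  obtain ⟨S, hS⟩ : ∃ S, pvStartsN (y :: rest) = 0 :: S := ⟨_, pvStartsN_cons y rest⟩
  have hB : pvBoundsN (y :: rest) = 0 :: (S ++ [(y :: rest).length]) := by
    simp [pvBoundsN, hS]
  obtain ⟨c, t', ht⟩ : ∃ c t', S ++ [(y :: rest).length] = c :: t' := by
    cases S with
    | nil => exact ⟨_, _, rfl⟩
    | cons a s => exact ⟨_, _, rfl⟩
  by_cases h : x + 1 = y
  · have hS' : pvStartsN (x :: y :: rest) = 0 :: S.map Nat.succ := by
      rw [pvStartsN_cons_cons, if_pos h, hS, List.tail_cons]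
    have hB' : pvBoundsN (x :: y :: rest) = 0 :: (S ++ [(y :: rest).length]).map Nat.succ := by
      simp [pvBoundsN, hS']
    rw [if_pos h]
    unfold pvRunsBN
    rw [hB', hB, ht, List.map_cons, List.tail_cons, List.tail_cons, List.zip_cons_cons,
        List.map_cons, show Nat.succ c :: List.map Nat.succ t' = List.map Nat.succ (c :: t') from rfl,
        List.zip_map, List.map_map, pvShift_eq, List.zip_cons_cons, List.map_cons]
    simp only [List.drop_zero, List.take_succ_cons, Nat.sub_zero, pvConsHead]
  · have hS' : pvStartsN (x :: y :: rest) = 0 :: (0 :: S).map Nat.succ := by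
      rw [pvStartsN_cons_cons, if_neg h, hS]
    have hB' : pvBoundsN (x :: y :: rest) = 0 :: (0 :: (S ++ [(y :: rest).length])).map Nat.succ := by
      simp [pvBoundsN, hS']
    rw [if_neg h]
    unfold pvRunsBN
    rw [hB', hB, List.map_cons, List.tail_cons, List.tail_cons, List.zip_cons_cons,
        List.map_cons,
        show Nat.succ 0 :: List.map Nat.succ (S ++ [(y :: rest).length])
            = List.map Nat.succ (0 :: (S ++ [(y :: rest).length])) from rfl,
        List.zip_map, List.map_map, pvShift_eq]
    simp only [List.drop_zero, List.take_succ_cons, List.take_zero, Nat.sub_zero]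

lemma pvRunsBN_eq_runs (l : List Int) : pvRunsBN l = pvRuns l := by
  induction l using pvRuns.induct with
  | case1 => rfl
  | case2 x => rfl
  | case3 x rest ih =>
    rw [pvRunsBN_cons_cons, if_pos rfl, ih]
    simp [pvRuns]
  | case4 x y rest h ih =>
    rw [pvRunsBN_cons_cons, if_neg h, ih]
    simp only [pvRuns, if_neg h]

-- ===== VERDICT (by name: the statement is the Claim_ definition above) =====
theorem Extract_phrases_from_indices_spec : Claim_equal_Extract_phrases_from_indices := by
  intro sentence a o _ _
  unfold Spec_Extract_phrases_from_indices Extract_phrases_from_indices Extract_phrases_from_indices_alt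
  simp only [pvA_eq_runs, pvB_eq_runsBN, pvRunsBN_eq_runs]
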